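-- pv_equiv track=rewrite | github.com/opendp/smartnoise-samples | attacks/reconstruction/reconstruction_module.py | get_plausible_variable_combinations
-- ===== SOURCE A (Python) =====
-- import itertools
--
-- def partial_powerset_minus_null(iterable, k):
--     s = list(iterable)
--     return itertools.chain.from_iterable(itertools.combinations(s, r) for r in range(1, k + 1))
--
-- def get_plausible_variable_combinations(non_income_data):
--     variable_combinations = list(partial_powerset_minus_null(non_income_data, 5))
--     plausible_variable_combinations = []
--
--     for combination in variable_combinations:
--         var_prefices = [elem.split('_')[0] for elem in combination]
--         if len(var_prefices) == len(set(var_prefices)):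
--             plausible_variable_combinations.append(combination)
--     return(plausible_variable_combinations)
-- ===== SOURCE B (Python) =====
-- def get_plausible_variable_combinations(non_income_data):
--     # Pruned DFS: instead of enumerating every combination of size <= 5 and then
--     # filtering, extend a combination only while its element prefixes stay distinct,
--     # so whole subtrees of implausible combinations are never generated.
--     items = list(non_income_data)
--     prefixes = [e.split('_')[0] for e in items]
--     n = len(items)
--     result = []
--
--     def extend(start, need, chosen, used):
--         if need == 0:
--             result.append(tuple(chosen))
--             return
--         for i in range(start, n):
--             p = prefixes[i]
--             if p not in used:
--                 used.add(p)
--                 chosen.append(items[i])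
--                 extend(i + 1, need - 1, chosen, used)
--                 chosen.pop()
--                 used.discard(p)
--
--     for r in range(1, 6):
--         extend(0, r, [], set())
--     return result
-- ===== Notes on version B (the rewrite author's own statement) =====
-- stated objective: alternative
-- what changed: A enumerates every combination of size 1..5 and filters by the distinct-prefix test afterwards; B generates combinations by a pruned DFS that carries the set of used prefixes and abandons a branch as soon as a prefix repeats, so implausible subtrees are never built (intended as faster; a timing run measured 3.22x at n=16 but could not confirm it at n=64, where the output itself has millions of tuples and neither side finishes).
import Mathlib
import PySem

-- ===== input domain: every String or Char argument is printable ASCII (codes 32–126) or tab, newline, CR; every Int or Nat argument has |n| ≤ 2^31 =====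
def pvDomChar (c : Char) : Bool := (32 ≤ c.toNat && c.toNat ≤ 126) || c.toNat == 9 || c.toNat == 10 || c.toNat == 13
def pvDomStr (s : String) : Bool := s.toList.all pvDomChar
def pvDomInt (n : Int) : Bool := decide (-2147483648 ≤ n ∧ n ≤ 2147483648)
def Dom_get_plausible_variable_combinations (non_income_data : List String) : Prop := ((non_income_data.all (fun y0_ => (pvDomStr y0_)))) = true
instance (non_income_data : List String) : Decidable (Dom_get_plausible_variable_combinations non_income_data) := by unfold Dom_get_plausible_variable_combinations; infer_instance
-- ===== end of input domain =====

-- B replaces A's enumerate-all-combinations-then-filter with a pruned DFS carrying the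
-- set of already-used prefixes, so implausible subtrees are never generated.


-- ===== PORT A =====
-- elem.split('_')[0] — split? with the nonempty separator "_" always returns 'some' of a
-- nonempty list, so the getD/headD defaults are unreachable; exact on the domain.
def pyPrefix (e : String) : String := ((PySem.Str.split? e "_").getD [e]).headD e

-- itertools.combinations(s, r): all r-element subsequences in index order
-- (standard recursive transliteration: those containing the head, then those without it)
def combosA : Nat → List String → List (List String)
  | 0, _ => [[]]
  | _ + 1, [] => []
  | r + 1, x :: xs => (combosA r xs).map (x :: ·) ++ combosA (r + 1) xs

def get_plausible_variable_combinations (non_income_data : List String) : List (List String) :=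
  -- list(partial_powerset_minus_null(non_income_data, 5)): chain combinations for r in range(1, 6)
  let variable_combinations := [1, 2, 3, 4, 5].flatMap (fun r => combosA r non_income_data)
  -- the filtering loop: keep a combination iff len(prefices) == len(set(prefices))
  variable_combinations.foldl
    (fun acc combination =>
      let var_prefices := combination.map pyPrefix
      if ((var_prefices.length : Int) == PySem.Set.len (PySem.Set.ofList var_prefices)) then
        acc ++ [combination]
      else acc) []

-- ===== PORT B =====
-- extend(start, need, chosen, used): combinations of exactly `need` elements of the
-- remaining suffix whose prefixes are distinct and unused, in index order
def extendB : Nat → List String → PySem.Set String → List (List String)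
  | 0, _, _ => [[]]
  | _ + 1, [], _ => []
  | need + 1, x :: xs, used =>
      let p := pyPrefix x
      (if PySem.Set.contains used p then []
       else (extendB need xs (PySem.Set.add used p)).map (x :: ·))
      ++ extendB (need + 1) xs used

def get_plausible_variable_combinations_alt (non_income_data : List String) : List (List String) :=
  [1, 2, 3, 4, 5].flatMap (fun r => extendB r non_income_data PySem.Set.empty)

-- ===== PRECONDITION & SPEC =====
def Spec_get_plausible_variable_combinations (non_income_data : List String) (out : List (List String)) : Prop := out = get_plausible_variable_combinations_alt non_income_data
instance (non_income_data : List String) (out : List (List String)) : Decidable (Spec_get_plausible_variable_combinations non_income_data out) := by unfold Spec_get_plausible_variable_combinations; infer_instance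

-- ===== CLAIM (what is proved, stated in full; the proofs are below) =====
def Claim_equal_get_plausible_variable_combinations : Prop := ∀ (non_income_data : List String), Dom_get_plausible_variable_combinations non_income_data → Spec_get_plausible_variable_combinations non_income_data (get_plausible_variable_combinations non_income_data)

-- ===== LEMMAS AND PROOFS =====

-- the plausibility test, written as the recursion extendB performs it
def okB (used : PySem.Set String) : List String → Bool
  | [] => true
  | x :: c => !PySem.Set.contains used (pyPrefix x) && okB (PySem.Set.add used (pyPrefix x)) c

-- PySem.Set.ofList keeps a subsequence of its input
theorem ofList_sublist (ps : List String) : (PySem.Set.ofList ps).Sublist ps := by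
  induction ps with
  | nil => simp [PySem.Set.ofList, PySem.Set.empty]
  | cons x xs ih =>
      rw [PySem.Set.ofList_cons]
      exact List.Sublist.cons₂ x (List.Sublist.trans (List.filter_sublist) ih)

-- A's length test is exactly Nodup of the prefix list
theorem lenTest_eq_nodup (ps : List String) :
    (((ps.length : Int)) == PySem.Set.len (PySem.Set.ofList ps)) = decide ps.Nodup := by
  by_cases h : ps.Nodup
  · simp [h, PySem.Set.len, PySem.Set.ofList_eq_self_of_nodup ps h]
  · have hlt : (PySem.Set.ofList ps).length < ps.length := by
      rcases Nat.lt_or_ge (PySem.Set.ofList ps).length ps.length with hl | hl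
      · exact hl
      · exfalso
        have := (ofList_sublist ps).eq_of_length
          (Nat.le_antisymm ((ofList_sublist ps).length_le) hl)
        exact h (this ▸ PySem.Set.nodup_ofList ps)
    simp only [h, decide_false, PySem.Set.len, beq_eq_false_iff_ne, ne_eq]
    intro hEq
    omega

theorem okB_iff (c : List String) : ∀ (used : PySem.Set String),
    okB used c = true ↔ (c.map pyPrefix).Nodup ∧ ∀ x ∈ c, pyPrefix x ∉ used := by
  induction c with
  | nil => intro used; simp [okB]
  | cons x c ih =>
      intro used
      simp only [okB, Bool.and_eq_true, Bool.not_eq_true', List.map_cons, List.nodup_cons,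
        List.mem_map, List.mem_cons, ih]
      constructor
      · rintro ⟨hc, hnd, hall⟩
        refine ⟨⟨?_, hnd⟩, ?_⟩
        · rintro ⟨y, hy, hEq⟩
          exact (hall y hy) ((PySem.Set.mem_add used (pyPrefix x) (pyPrefix y)).2 (Or.inr hEq))
        · rintro z (rfl | hz)
          · intro hmem
            have h2 := (PySem.Set.contains_iff used (pyPrefix z)).2 hmem
            rw [hc] at h2
            exact Bool.false_ne_true h2
          · intro hmem
            exact (hall z hz) ((PySem.Set.mem_add used (pyPrefix x) (pyPrefix z)).2 (Or.inl hmem))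
      · rintro ⟨⟨hnx, hnd⟩, hall⟩
        refine ⟨?_, hnd, ?_⟩
        · by_cases hc : PySem.Set.contains used (pyPrefix x) = true
          · exact absurd ((PySem.Set.contains_iff used _).1 hc) (hall x (Or.inl rfl))
          · simpa using hc
        · intro z hz hmem
          rcases (PySem.Set.mem_add used (pyPrefix x) (pyPrefix z)).1 hmem with h1 | h1
          · exact hall z (Or.inr hz) h1
          · exact hnx ⟨z, hz, h1⟩

-- the pruned DFS equals "enumerate then filter with the running used-set test"
theorem extendB_eq_filter (xs : List String) : ∀ (r : Nat) (used : PySem.Set String),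
    extendB r xs used = (combosA r xs).filter (okB used) := by
  induction xs with
  | nil =>
      intro r used
      match r with
      | 0 => simp [extendB, combosA, okB]
      | r + 1 => simp [extendB, combosA]
  | cons x xs ih =>
      intro r used
      match r with
      | 0 => simp [extendB, combosA, okB]
      | r + 1 =>
          simp only [extendB, combosA, List.filter_append, List.filter_map]
          congr 1
          · by_cases hm : pyPrefix x ∈ used
            · have hc : PySem.Set.contains used (pyPrefix x) = true :=
                (PySem.Set.contains_iff used (pyPrefix x)).2 hm
              simp [hm, List.filter_eq_nil_iff, Function.comp, okB]
            · have hc : PySem.Set.contains used (pyPrefix x) = false := by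
                by_cases h2 : PySem.Set.contains used (pyPrefix x) = true
                · exact absurd ((PySem.Set.contains_iff used _).1 h2) hm
                · simpa using h2
              simp only [hc, if_false, Bool.false_eq_true, ih r]
              refine congrArg _ (List.filter_congr ?_)
              intro c _
              show okB (used.add (pyPrefix x)) c = okB used (x :: c)
              conv_rhs => rw [okB]
              rw [hc]
              simp
          · exact ih (r + 1) used

-- on an empty used-set, okB is exactly A's Nodup-of-prefixes test
theorem okB_empty_eq (c : List String) :
    (((c.map pyPrefix).length : Int) == PySem.Set.len (PySem.Set.ofList (c.map pyPrefix)))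
      = okB PySem.Set.empty c := by
  rw [lenTest_eq_nodup]
  by_cases h : okB PySem.Set.empty c = true
  · rw [decide_eq_true ((okB_iff c PySem.Set.empty).1 h).1]
    exact h.symm
  · simp only [Bool.not_eq_true] at h
    have hnd : ¬ (c.map pyPrefix).Nodup := by
      intro hnd
      have := (okB_iff c PySem.Set.empty).2 ⟨hnd, by simp [PySem.Set.empty]⟩
      rw [h] at this
      exact Bool.false_ne_true this
    rw [decide_eq_false hnd]
    exact h.symm

-- ===== VERDICT (by name: the statement is the Claim_ definition above) =====
theorem get_plausible_variable_combinations_spec : Claim_equal_get_plausible_variable_combinations := by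
  intro l _
  unfold Spec_get_plausible_variable_combinations
  unfold get_plausible_variable_combinations get_plausible_variable_combinations_alt
  simp only
  rw [PySem.List.foldl_append_if_eq_filter]
  rw [List.nil_append, List.filter_flatMap]
  have hpred : (fun combination : List String =>
      ((combination.map pyPrefix).length : Int)
        == PySem.Set.len (PySem.Set.ofList (combination.map pyPrefix))) = okB PySem.Set.empty :=
    funext okB_empty_eq
  simp only [hpred, extendB_eq_filter]
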